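-- pv_equiv track=rewrite | github.com/semcod/planfile | planfile/cli/project_detector/inference.py | _infer_node_project_type
-- ===== SOURCE A (Python) =====
-- def _infer_node_project_type(deps: list, package_data: dict) -> str | None:
--     """Infer Node.js project type from dependencies."""
--     dep_names = [d.lower() for d in deps]
--
--     # Check for API frameworks
--     if any(d in dep_names for d in ["express", "fastify", "koa", "hapi", "restify", "nestjs"]):
--         return "api"
--
--     # Check for frontend frameworks
--     if any(d in dep_names for d in ["react", "vue", "angular", "svelte", "next", "nuxt"]):
--         return "web"
--
--     # Check for CLI tools
--     if any(d in dep_names for d in ["commander", "yargs", "inquirer", "oclif"]):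
--         return "cli"
--
--     # Check bin field
--     if package_data.get("bin"):
--         return "cli"
--
--     return "web"  # Default for Node.js
-- ===== SOURCE B (Python) =====
-- _CATEGORY = {
--     "express": "api", "fastify": "api", "koa": "api", "hapi": "api",
--     "restify": "api", "nestjs": "api",
--     "react": "web", "vue": "web", "angular": "web", "svelte": "web",
--     "next": "web", "nuxt": "web",
--     "commander": "cli", "yargs": "cli", "inquirer": "cli", "oclif": "cli",
-- }
--
-- def _infer_node_project_type(deps, package_data):
--     """Infer Node.js project type from dependencies (dep-major single pass)."""
--     found = set()
--     for d in deps: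
--         cat = _CATEGORY.get(d.lower())
--         if cat is not None:
--             found.add(cat)
--     if "api" in found:
--         return "api"
--     if "web" in found:
--         return "web"
--     if "cli" in found or package_data.get("bin"):
--         return "cli"
--     return "web"
-- ===== Notes on version B (the rewrite author's own statement) =====
-- stated objective: idiomatic
-- what changed: Replaced three category-major any() scans over the dependency list with a constant dep-to-category table, one dep-major pass collecting the categories found into a set, and a final priority resolution (api > web > cli/bin > web default); one hashed lookup per dep replaces up to 16 list-membership scans.
import Mathlib
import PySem

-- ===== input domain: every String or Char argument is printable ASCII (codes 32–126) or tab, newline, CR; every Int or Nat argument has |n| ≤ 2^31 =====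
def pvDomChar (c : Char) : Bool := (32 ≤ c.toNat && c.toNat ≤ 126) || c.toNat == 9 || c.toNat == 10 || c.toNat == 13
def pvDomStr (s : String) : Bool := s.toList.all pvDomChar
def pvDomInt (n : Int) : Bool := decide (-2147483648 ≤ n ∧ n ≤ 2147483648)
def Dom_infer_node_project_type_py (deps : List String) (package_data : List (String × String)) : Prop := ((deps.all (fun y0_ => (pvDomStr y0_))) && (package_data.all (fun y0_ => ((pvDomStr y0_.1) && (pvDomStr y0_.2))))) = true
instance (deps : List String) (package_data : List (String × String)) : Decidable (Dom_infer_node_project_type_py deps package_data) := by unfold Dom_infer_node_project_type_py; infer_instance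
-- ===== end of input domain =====

-- B replaces A's three category-major any() scans by a constant dep→category table,
-- one dep-major pass collecting found categories into a set, and a priority resolution (idiomatic; return value only).

-- ===== PORT A =====
-- truthiness of package_data.get("bin"): a missing key or empty string is falsy
def pvBinTruthy (package_data : List (String × String)) : Bool :=
  match PySem.Dict.get? (PySem.Dict.mk package_data) "bin" with
  | some s => decide (s ≠ "")
  | none => false

def infer_node_project_type_py (deps : List String) (package_data : List (String × String)) : Option String :=
  let dep_names := deps.map PySem.Str.lower
  if ["express", "fastify", "koa", "hapi", "restify", "nestjs"].any (fun d => dep_names.contains d) then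
    some "api"
  else if ["react", "vue", "angular", "svelte", "next", "nuxt"].any (fun d => dep_names.contains d) then
    some "web"
  else if ["commander", "yargs", "inquirer", "oclif"].any (fun d => dep_names.contains d) then
    some "cli"
  else if pvBinTruthy package_data then
    some "cli"
  else
    some "web"

-- ===== PORT B =====
def pvCatMap : PySem.Dict String String := PySem.Dict.mk
  [("express", "api"), ("fastify", "api"), ("koa", "api"), ("hapi", "api"),
   ("restify", "api"), ("nestjs", "api"),
   ("react", "web"), ("vue", "web"), ("angular", "web"), ("svelte", "web"),
   ("next", "web"), ("nuxt", "web"),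
   ("commander", "cli"), ("yargs", "cli"), ("inquirer", "cli"), ("oclif", "cli")]

def infer_node_project_type_py_alt (deps : List String) (package_data : List (String × String)) : Option String :=
  let found : PySem.Set String := deps.foldl (fun s d =>
    match PySem.Dict.get? pvCatMap (PySem.Str.lower d) with
    | some c => PySem.Set.add s c
    | none => s) PySem.Set.empty
  if PySem.Set.contains found "api" then some "api"
  else if PySem.Set.contains found "web" then some "web"
  else if PySem.Set.contains found "cli" ||
      (match PySem.Dict.get? (PySem.Dict.mk package_data) "bin" with
       | some s => decide (s ≠ "")
       | none => false) then some "cli"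
  else some "web"

-- ===== PRECONDITION & SPEC =====
def Spec_infer_node_project_type_py (deps : List String) (package_data : List (String × String)) (out : Option String) : Prop := out = infer_node_project_type_py_alt deps package_data
instance (deps : List String) (package_data : List (String × String)) (out : Option String) : Decidable (Spec_infer_node_project_type_py deps package_data out) := by unfold Spec_infer_node_project_type_py; infer_instance

-- ===== CLAIM (what is proved, stated in full; the proofs are below) =====
def Claim_equal_infer_node_project_type_py : Prop := ∀ (deps : List String) (package_data : List (String × String)), Dom_infer_node_project_type_py deps package_data → Spec_infer_node_project_type_py deps package_data (infer_node_project_type_py deps package_data)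

-- ===== LEMMAS AND PROOFS =====

-- category-major scan = dep-major scan
theorem pv_any_swap (l xs : List String) :
    l.any (fun a => xs.contains a) = xs.any (fun x => l.contains x) := by
  rw [Bool.eq_iff_iff]
  simp only [List.any_eq_true, List.contains_iff_mem]
  exact ⟨fun ⟨a, h1, h2⟩ => ⟨a, h2, h1⟩, fun ⟨a, h1, h2⟩ => ⟨a, h2, h1⟩⟩

-- membership in the fold-built set of found categories
theorem pv_mem_found (deps : List String) (s : PySem.Set String) (c : String) :
    (c ∈ deps.foldl (fun s d =>
      match PySem.Dict.get? pvCatMap (PySem.Str.lower d) with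
      | some c => PySem.Set.add s c
      | none => s) s) ↔
    c ∈ s ∨ ∃ d ∈ deps, PySem.Dict.get? pvCatMap (PySem.Str.lower d) = some c := by
  induction deps generalizing s with
  | nil => simp
  | cons d rest ih =>
    simp only [List.foldl_cons, List.mem_cons]
    cases h : PySem.Dict.get? pvCatMap (PySem.Str.lower d) with
    | none =>
      rw [ih]
      constructor
      · rintro (h1 | ⟨d', hd', h2⟩)
        · exact Or.inl h1
        · exact Or.inr ⟨d', Or.inr hd', h2⟩
      · rintro (h1 | ⟨d', (rfl | hd'), h2⟩)
        · exact Or.inl h1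
        · rw [h] at h2; cases h2
        · exact Or.inr ⟨d', hd', h2⟩
    | some c' =>
      rw [ih, PySem.Set.mem_add]
      constructor
      · rintro ((h1 | rfl) | ⟨d', hd', h2⟩)
        · exact Or.inl h1
        · exact Or.inr ⟨d, Or.inl rfl, h⟩
        · exact Or.inr ⟨d', Or.inr hd', h2⟩
      · rintro (h1 | ⟨d', (rfl | hd'), h2⟩)
        · exact Or.inl (Or.inl h1)
        · rw [h] at h2; injection h2 with h2; exact Or.inl (Or.inr h2.symm)
        · exact Or.inr ⟨d', hd', h2⟩

-- the table lookup agrees with membership in each keyword list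
theorem pv_cat_mem (t c : String) :
    PySem.Dict.get? pvCatMap t = some c ↔ (t, c) ∈ pvCatMap.items :=
  PySem.Dict.get?_eq_some_iff_mem_items pvCatMap t c (by decide)

theorem pv_cat_api (t : String) :
    (PySem.Dict.get? pvCatMap t = some "api") ↔
    t ∈ (["express", "fastify", "koa", "hapi", "restify", "nestjs"] : List String) := by
  rw [pv_cat_mem]; simp [pvCatMap, Prod.ext_iff]

theorem pv_cat_web (t : String) :
    (PySem.Dict.get? pvCatMap t = some "web") ↔
    t ∈ (["react", "vue", "angular", "svelte", "next", "nuxt"] : List String) := by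
  rw [pv_cat_mem]; simp [pvCatMap, Prod.ext_iff]

theorem pv_cat_cli (t : String) :
    (PySem.Dict.get? pvCatMap t = some "cli") ↔
    t ∈ (["commander", "yargs", "inquirer", "oclif"] : List String) := by
  rw [pv_cat_mem]; simp [pvCatMap, Prod.ext_iff]

-- A's scan condition for a category equals B's found-set membership
theorem pv_cond (deps : List String) (L : List String) (c : String)
    (hL : ∀ t, (PySem.Dict.get? pvCatMap t = some c) ↔ t ∈ L) :
    (L.any (fun a => (deps.map PySem.Str.lower).contains a)) =
    (PySem.Set.contains (deps.foldl (fun s d =>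
      match PySem.Dict.get? pvCatMap (PySem.Str.lower d) with
      | some c => PySem.Set.add s c
      | none => s) PySem.Set.empty) c) := by
  rw [pv_any_swap, Bool.eq_iff_iff]
  simp only [List.any_eq_true, List.mem_map, PySem.Set.contains_iff, pv_mem_found]
  constructor
  · rintro ⟨x, ⟨d, hd, rfl⟩, hx⟩
    exact Or.inr ⟨d, hd, (hL _).mpr (by simpa using hx)⟩
  · rintro (h | ⟨d, hd, h⟩)
    · simp [PySem.Set.empty] at h
    · exact ⟨PySem.Str.lower d, ⟨d, hd, rfl⟩, by simpa using (hL _).mp h⟩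

-- ===== VERDICT (by name: the statement is the Claim_ definition above) =====
theorem infer_node_project_type_py_spec : Claim_equal_infer_node_project_type_py := by
  intro deps package_data _
  unfold Spec_infer_node_project_type_py infer_node_project_type_py infer_node_project_type_py_alt pvBinTruthy
  simp only
  rw [← pv_cond deps _ "api" pv_cat_api, ← pv_cond deps _ "web" pv_cat_web,
      ← pv_cond deps _ "cli" pv_cat_cli]
  simp only [Bool.or_eq_true]
  split_ifs <;> tauto
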